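-- pv_equiv track=rewrite | github.com/sonnysorry/codingtest | Hyeongdo/brute_force_boj/pro_1.py | solution
-- ===== SOURCE A (Python) =====
-- def solution(answers):
--     answer = []
--     first = [1,2,3,4,5]
--     second = [2, 1, 2, 3, 2, 4, 2, 5]
--     third = [3, 3, 1, 1, 2, 2, 4, 4, 5, 5]
--     count = [0, 0, 0]
--     for i in range(len(answers)):
--         a = i % len(first)
--         b = i % len(second)
--         c = i % len(third)
--         if int(first[a]) == int(answers[i]):
--             count[0] += 1
--         if int(second[b]) == int(answers[i]):
--             count[1] += 1
--         if int(third[c]) == int(answers[i]):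
--             count[2] += 1
--     max_count = max(count)
--     for j in range(len(count)):
--         if max_count == count[j]:
--             answer.append(j+1)
--     return answer
-- ===== SOURCE B (Python) =====
-- def _score(pat, answers):
--     """Matches of `answers` against `pat` repeated cyclically, one independent pass."""
--     rem = []
--     s = 0
--     for a in answers:
--         if not rem:
--             rem = list(pat)
--         p = rem.pop(0)
--         if p == a:
--             s += 1
--     return s
--
--
-- def solution(answers):
--     patterns = [[1, 2, 3, 4, 5],
--                 [2, 1, 2, 3, 2, 4, 2, 5],
--                 [3, 3, 1, 1, 2, 2, 4, 4, 5, 5]]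
--     counts = [_score(p, answers) for p in patterns]
--     best = max(counts)
--     return [j + 1 for j, c in enumerate(counts) if c == best]
-- ===== Notes on version B (the rewrite author's own statement) =====
-- stated objective: alternative
-- what changed: Replaces A's single combined index loop (three modular lookups and three counters per element) with three independent per-pattern passes that consume a shrinking remainder of the pattern (an explicit cycle), then selects the 1-indexed maxima from the score list with max/enumerate.
import Mathlib
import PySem

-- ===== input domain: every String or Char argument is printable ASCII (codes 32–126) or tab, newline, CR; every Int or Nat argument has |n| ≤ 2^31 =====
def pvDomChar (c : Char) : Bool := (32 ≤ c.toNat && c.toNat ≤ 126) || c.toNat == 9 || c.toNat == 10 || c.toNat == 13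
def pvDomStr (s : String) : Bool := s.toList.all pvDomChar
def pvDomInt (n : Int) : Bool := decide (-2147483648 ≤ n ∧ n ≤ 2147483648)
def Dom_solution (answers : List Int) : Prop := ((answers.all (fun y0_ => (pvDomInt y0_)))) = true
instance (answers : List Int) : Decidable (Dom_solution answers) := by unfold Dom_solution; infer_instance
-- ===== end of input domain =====

-- B replaces A's combined modular-index scan with three independent cyclic passes; objective: alternative decomposition.

-- ===== PORT A =====
-- Literal port of A. count is the 3-element list [0,0,0] updated in place (List.set);
-- answers[i] and first[a] etc. are ported with pyGetD: the indices are always in range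
-- (i ranges over range(len(answers)), a = i % len(pattern)), so the default is never read
-- and A is total. int() applied to an int is the identity and is ported as such.
-- The three constant pattern lists and the loop body are hoisted into named helpers.
def firstA : List Int := [1, 2, 3, 4, 5]
def secondA : List Int := [2, 1, 2, 3, 2, 4, 2, 5]
def thirdA : List Int := [3, 3, 1, 1, 2, 2, 4, 4, 5, 5]

def loopBodyA (answers : List Int) (count : List Int) (i : Int) : List Int :=
  let a := PySem.Int.mod i (firstA.length : Int)
  let b := PySem.Int.mod i (secondA.length : Int)
  let c := PySem.Int.mod i (thirdA.length : Int)
  let count := if PySem.List.pyGetD firstA a 0 = PySem.List.pyGetD answers i 0 then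
      count.set 0 (count.getD 0 0 + 1) else count
  let count := if PySem.List.pyGetD secondA b 0 = PySem.List.pyGetD answers i 0 then
      count.set 1 (count.getD 1 0 + 1) else count
  if PySem.List.pyGetD thirdA c 0 = PySem.List.pyGetD answers i 0 then
      count.set 2 (count.getD 2 0 + 1) else count

def solution (answers : List Int) : List Int :=
  let count : List Int :=
    (PySem.List.pyRange 0 (answers.length : Int) 1).foldl (loopBodyA answers) [0, 0, 0]
  let maxCount := max (count.getD 0 0) (max (count.getD 1 0) (count.getD 2 0))
  (PySem.List.pyRange 0 (count.length : Int) 1).foldl (fun answer j =>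
    if maxCount = PySem.List.pyGetD count j 0 then answer ++ [j + 1] else answer) []

-- ===== PORT B =====
-- Port of Source B's _score: one pass over answers consuming a remainder `rem` of the
-- pattern, refilled from the full pattern (h :: t) whenever it is empty (rem.pop(0) = head).
def scoreB (h : Int) (t : List Int) : List Int → List Int → Int
  | _, [] => 0
  | [], x :: xs => (if h = x then 1 else 0) + scoreB h t t xs
  | p :: ps, x :: xs => (if p = x then 1 else 0) + scoreB h t ps xs

def solution_alt (answers : List Int) : List Int :=
  let patterns : List (Int × List Int) :=
    [(1, [2, 3, 4, 5]), (2, [1, 2, 3, 2, 4, 2, 5]), (3, [3, 1, 1, 2, 2, 4, 4, 5, 5])]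
  let counts := patterns.map (fun p => scoreB p.1 p.2 [] answers)
  let best := (PySem.List.max? counts (fun y => y)).getD 0
  (PySem.List.enumerate counts 0).filterMap (fun jc => if jc.2 = best then some (jc.1 + 1) else none)

-- ===== PRECONDITION & SPEC =====
def Spec_solution (answers : List Int) (out : List Int) : Prop := out = solution_alt answers
instance (answers : List Int) (out : List Int) : Decidable (Spec_solution answers out) := by unfold Spec_solution; infer_instance

-- ===== CLAIM (what is proved, stated in full; the proofs are below) =====
def Claim_equal_solution : Prop := ∀ (answers : List Int), Dom_solution answers → Spec_solution answers (solution answers)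

-- ===== LEMMAS AND PROOFS =====

-- refilling from empty equals starting from the full pattern
lemma scoreB_nil_eq_full (h : Int) (t : List Int) (xs : List Int) :
    scoreB h t [] xs = scoreB h t (h :: t) xs := by
  cases xs <;> rfl

lemma scoreB_drop_cons (h : Int) (t : List Int) (k : Nat) (hk : k < t.length + 1)
    (x : Int) (xs : List Int) :
    scoreB h t ((h :: t).drop k) (x :: xs)
      = (if (h :: t).getD k 0 = x then 1 else 0)
        + scoreB h t ((h :: t).drop ((k + 1) % (t.length + 1))) xs := by
  have hk' : k < (h :: t).length := by simpa using hk
  rw [List.drop_eq_getElem_cons hk']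
  show (if (h :: t)[k] = x then 1 else 0) + scoreB h t ((h :: t).drop (k + 1)) xs = _
  rw [List.getD_eq_getElem _ _ hk']
  by_cases hlt : k + 1 < t.length + 1
  · rw [Nat.mod_eq_of_lt hlt]
  · have : k + 1 = t.length + 1 := by omega
    rw [this, Nat.mod_self]
    have hdrop : (h :: t).drop (t.length + 1) = ([] : List Int) := by
      apply List.drop_of_length_le; simp
    rw [hdrop, List.drop_zero, scoreB_nil_eq_full]

-- the body of A's counting loop, on its (index, element) pair
def bodyA (count : List Int) (p : Int × Int) : List Int :=
  let a := PySem.Int.mod p.1 5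
  let b := PySem.Int.mod p.1 8
  let c := PySem.Int.mod p.1 10
  let count := if PySem.List.pyGetD ([1, 2, 3, 4, 5] : List Int) a 0 = p.2 then
      count.set 0 (count.getD 0 0 + 1) else count
  let count := if PySem.List.pyGetD ([2, 1, 2, 3, 2, 4, 2, 5] : List Int) b 0 = p.2 then
      count.set 1 (count.getD 1 0 + 1) else count
  if PySem.List.pyGetD ([3, 3, 1, 1, 2, 2, 4, 4, 5, 5] : List Int) c 0 = p.2 then
      count.set 2 (count.getD 2 0 + 1) else count

lemma count_loop (xs : List Int) : ∀ (k : Nat) (c0 c1 c2 : Int),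
    (PySem.List.enumerate xs (k : Int)).foldl bodyA [c0, c1, c2]
      = [c0 + scoreB 1 [2, 3, 4, 5] (([1, 2, 3, 4, 5] : List Int).drop (k % 5)) xs,
         c1 + scoreB 2 [1, 2, 3, 2, 4, 2, 5] (([2, 1, 2, 3, 2, 4, 2, 5] : List Int).drop (k % 8)) xs,
         c2 + scoreB 3 [3, 1, 1, 2, 2, 4, 4, 5, 5] (([3, 3, 1, 1, 2, 2, 4, 4, 5, 5] : List Int).drop (k % 10)) xs] := by
  induction xs with
  | nil => intro k c0 c1 c2; simp [PySem.List.enumerate_nil, scoreB]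
  | cons x xs ih =>
    intro k c0 c1 c2
    rw [PySem.List.enumerate_cons]
    rw [scoreB_drop_cons 1 [2, 3, 4, 5] (k % 5)
      (by simp only [List.length_cons, List.length_nil]; omega) x xs]
    rw [scoreB_drop_cons 2 [1, 2, 3, 2, 4, 2, 5] (k % 8)
      (by simp only [List.length_cons, List.length_nil]; omega) x xs]
    rw [scoreB_drop_cons 3 [3, 1, 1, 2, 2, 4, 4, 5, 5] (k % 10)
      (by simp only [List.length_cons, List.length_nil]; omega) x xs]
    have e5 : (k % 5 + 1) % 5 = (k + 1) % 5 := by omega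
    have e8 : (k % 8 + 1) % 8 = (k + 1) % 8 := by omega
    have e10 : (k % 10 + 1) % 10 = (k + 1) % 10 := by omega
    rw [List.foldl_cons]
    have hpush : ((k : Int) + 1) = ((k + 1 : Nat) : Int) := by push_cast; ring
    have m5 : PySem.Int.mod (k : Int) 5 = ((k % 5 : Nat) : Int) := by
      exact_mod_cast PySem.Int.mod_natCast k 5
    have m8 : PySem.Int.mod (k : Int) 8 = ((k % 8 : Nat) : Int) := by
      exact_mod_cast PySem.Int.mod_natCast k 8
    have m10 : PySem.Int.mod (k : Int) 10 = ((k % 10 : Nat) : Int) := by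
      exact_mod_cast PySem.Int.mod_natCast k 10
    have hb : bodyA [c0, c1, c2] ((k : Int), x)
        = [c0 + (if (([1, 2, 3, 4, 5] : List Int).getD (k % 5) 0 = x) then 1 else 0),
           c1 + (if (([2, 1, 2, 3, 2, 4, 2, 5] : List Int).getD (k % 8) 0 = x) then 1 else 0),
           c2 + (if (([3, 3, 1, 1, 2, 2, 4, 4, 5, 5] : List Int).getD (k % 10) 0 = x) then 1 else 0)] := by
      simp only [bodyA, m5, m8, m10, PySem.List.pyGetD_natCast]
      split_ifs <;> simp [List.set]
    rw [hb, hpush, ih (k + 1) _ _ _]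
    simp [add_assoc, e5, e8, e10]

set_option maxRecDepth 4096 in
lemma final_step (s1 s2 s3 : Int) :
    (PySem.List.pyRange 0 (([s1, s2, s3] : List Int).length : Int) 1).foldl (fun answer j =>
      if max (([s1, s2, s3] : List Int).getD 0 0)
          (max (([s1, s2, s3] : List Int).getD 1 0) (([s1, s2, s3] : List Int).getD 2 0))
          = PySem.List.pyGetD ([s1, s2, s3] : List Int) j 0 then answer ++ [j + 1] else answer) []
    = (PySem.List.enumerate ([s1, s2, s3] : List Int) 0).filterMap (fun jc =>
        if jc.2 = (PySem.List.max? [s1, s2, s3] (fun y => y)).getD 0 then some (jc.1 + 1) else none) := by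
  have hr : PySem.List.pyRange 0 (([s1, s2, s3] : List Int).length : Int) 1 = [0, 1, 2] := by
    simp only [List.length_cons, List.length_nil]
    decide
  have hm : (PySem.List.max? [s1, s2, s3] (fun y => y)).getD 0 = max s1 (max s2 s3) := by
    rw [PySem.List.max?_id_cons]; simp [List.foldl, max_assoc]
  rw [hr, hm]
  have g0 : PySem.List.pyGetD ([s1, s2, s3] : List Int) 0 0 = s1 := by simp [PySem.List.pyGetD]
  have g1 : PySem.List.pyGetD ([s1, s2, s3] : List Int) 1 0 = s2 := by simp [PySem.List.pyGetD]
  have g2 : PySem.List.pyGetD ([s1, s2, s3] : List Int) 2 0 = s3 := by simp [PySem.List.pyGetD]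
  simp only [List.foldl_cons, List.foldl_nil, g0, g1, g2, List.getD, List.getElem?_cons_zero,
    List.getElem?_cons_succ, Option.getD_some, PySem.List.enumerate_cons, PySem.List.enumerate_nil,
    List.filterMap_cons, List.filterMap_nil]
  simp only [eq_comm (a := s1) (b := max s1 (max s2 s3)), eq_comm (a := s2) (b := max s1 (max s2 s3)),
    eq_comm (a := s3) (b := max s1 (max s2 s3))]
  split_ifs <;> norm_num

-- ===== VERDICT (by name: the statement is the Claim_ definition above) =====
theorem solution_spec : Claim_equal_solution := by
  intro answers _
  show solution answers = solution_alt answers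
  have hbody : loopBodyA answers = fun count i => bodyA count (i, PySem.List.pyGetD answers i 0) := by
    funext count i
    rfl
  have hc : (PySem.List.pyRange 0 (answers.length : Int) 1).foldl (loopBodyA answers) [0, 0, 0]
      = [scoreB 1 [2, 3, 4, 5] [] answers,
         scoreB 2 [1, 2, 3, 2, 4, 2, 5] [] answers,
         scoreB 3 [3, 1, 1, 2, 2, 4, 4, 5, 5] [] answers] := by
    rw [hbody]
    have he : (PySem.List.enumerate answers 0).foldl bodyA [0, 0, 0]
        = (PySem.List.pyRange 0 (answers.length : Int) 1).foldl
            (fun count i => bodyA count (i, PySem.List.pyGetD answers i 0)) [0, 0, 0] := by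
      rw [PySem.List.enumerate_eq_map_pyRange answers 0, List.foldl_map]
      simp [PySem.List.len]
    rw [← he]
    have hcl := count_loop answers 0 0 0 0
    norm_num at hcl
    rw [hcl, ← scoreB_nil_eq_full 1, ← scoreB_nil_eq_full 2, ← scoreB_nil_eq_full 3]
  unfold solution solution_alt
  simp only [hc, List.map_cons, List.map_nil]
  exact final_step _ _ _
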